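-- pv_equiv track=rewrite | github.com/senecando/ptolemy | ptolemy.py | next_to_evaluate
-- ===== SOURCE A (Python) =====
-- def next_to_evaluate(triplets):
-- 	order = ['^', '*', ':', '+', '-']
-- 	for operator in order:
-- 		c = 0
-- 		for x in triplets:
-- 			if (x[1] == operator):
-- 				return c
-- 			c += 1
-- 	return 0
-- ===== SOURCE B (Python) =====
-- def next_to_evaluate(triplets):
--     rank = {'^': 0, '*': 1, ':': 2, '+': 3, '-': 4}
--     best = None  # (rank, index) of highest-precedence operator seen, first occurrence wins
--     for i, x in enumerate(triplets):
--         r = rank.get(x[1])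
--         if r is not None and (best is None or r < best[0]):
--             best = (r, i)
--     return best[1] if best is not None else 0
-- ===== Notes on version B (the rewrite author's own statement) =====
-- stated objective: simpler
-- what changed: Replaces A's five whole-list scans (one per operator in precedence order) by a single pass that tracks the minimal precedence rank seen and its first index via a rank dictionary.
import Mathlib
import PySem

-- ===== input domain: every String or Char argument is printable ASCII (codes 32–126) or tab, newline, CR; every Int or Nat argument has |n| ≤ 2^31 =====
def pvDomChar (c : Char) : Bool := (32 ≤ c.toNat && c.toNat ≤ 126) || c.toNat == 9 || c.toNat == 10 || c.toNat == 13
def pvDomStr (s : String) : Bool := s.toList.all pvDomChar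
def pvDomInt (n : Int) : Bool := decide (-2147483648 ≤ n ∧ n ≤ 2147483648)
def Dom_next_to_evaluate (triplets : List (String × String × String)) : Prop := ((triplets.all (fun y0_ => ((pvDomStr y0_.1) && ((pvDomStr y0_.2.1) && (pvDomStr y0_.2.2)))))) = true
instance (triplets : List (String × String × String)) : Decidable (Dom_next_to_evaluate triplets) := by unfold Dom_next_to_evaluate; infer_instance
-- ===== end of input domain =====

-- B replaces A's five whole-list scans (one per operator in precedence order) by a single
-- pass that tracks the minimal precedence rank seen and its first index; objective: simpler.


-- ===== PORT A =====
-- inner loop 'for x in triplets' with counter c; 'return c' on a match becomes 'some c'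
def pvInnerA (triplets : List (String × String × String)) (c : Int) (operator : String) : Option Int :=
  match triplets with
  | [] => none
  | x :: xs => if x.2.1 = operator then some c else pvInnerA xs (c + 1) operator

-- outer loop 'for operator in order'; falls through to the next operator when no match
def pvOuterA (order : List String) (triplets : List (String × String × String)) : Int :=
  match order with
  | [] => 0
  | operator :: rest =>
    match pvInnerA triplets 0 operator with
    | some c => c
    | none => pvOuterA rest triplets

def next_to_evaluate (triplets : List (String × String × String)) : Int :=
  pvOuterA ["^", "*", ":", "+", "-"] triplets

-- ===== PORT B =====
-- the dict literal rank = {'^': 0, '*': 1, ':': 2, '+': 3, '-': 4}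
def pvRankB : PySem.Dict String Int :=
  PySem.Dict.ofList [("^", 0), ("*", 1), (":", 2), ("+", 3), ("-", 4)]

-- body of 'if r is not None and (best is None or r < best[0]): best = (r, i)'
def pvStepB (r? : Option Int) (best : Option (Int × Int)) (i : Int) : Option (Int × Int) :=
  match r? with
  | none => best
  | some r =>
    match best with
    | none => some (r, i)
    | some (br, bi) => if r < br then some (r, i) else some (br, bi)

-- the 'for i, x in enumerate(triplets)' loop carrying best = (rank, index) or None
def pvGoB (triplets : List (String × String × String)) (i : Int) (best : Option (Int × Int)) :
    Option (Int × Int) :=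
  match triplets with
  | [] => best
  | x :: xs => pvGoB xs (i + 1) (pvStepB (pvRankB.get? x.2.1) best i)

def next_to_evaluate_alt (triplets : List (String × String × String)) : Int :=
  match pvGoB triplets 0 none with
  | some (_, bi) => bi
  | none => 0

-- ===== PRECONDITION & SPEC =====
def Spec_next_to_evaluate (triplets : List (String × String × String)) (out : Int) : Prop := out = next_to_evaluate_alt triplets
instance (triplets : List (String × String × String)) (out : Int) : Decidable (Spec_next_to_evaluate triplets out) := by unfold Spec_next_to_evaluate; infer_instance

-- ===== CLAIM (what is proved, stated in full; the proofs are below) =====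
def Claim_equal_next_to_evaluate : Prop := ∀ (triplets : List (String × String × String)), Dom_next_to_evaluate triplets → Spec_next_to_evaluate triplets (next_to_evaluate triplets)

-- ===== LEMMAS AND PROOFS =====

-- (minimal rank among the five operators in the suffix, index of its first occurrence),
-- with indices starting at c; the common characterisation both ports are reduced to.
def pvFront (r? : Option Int) (c : Int) (m : Option (Int × Int)) : Option (Int × Int) :=
  match r?, m with
  | none, m => m
  | some r, none => some (r, c)
  | some r, some (r', j) => if r ≤ r' then some (r, c) else some (r', j)

def pvCasc (triplets : List (String × String × String)) (c : Int) : Option (Int × Int) :=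
  match triplets with
  | [] => none
  | x :: xs => pvFront (pvRankB.get? x.2.1) c (pvCasc xs (c + 1))

def pvMerge (b m : Option (Int × Int)) : Option (Int × Int) :=
  match b, m with
  | none, m => m
  | some b, none => some b
  | some (br, bi), some (r, j) => if r < br then some (r, j) else some (br, bi)

lemma pvRank_none (s : String) (h0 : s ≠ "^") (h1 : s ≠ "*") (h2 : s ≠ ":")
    (h3 : s ≠ "+") (h4 : s ≠ "-") : pvRankB.get? s = none := by
  have h : pvRankB = PySem.Dict.mk [("^", 0), ("*", 1), (":", 2), ("+", 3), ("-", 4)] := by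
    decide
  rw [h]
  simp [PySem.Dict.get?_mk_cons, beq_iff_eq, Ne.symm h0, Ne.symm h1, Ne.symm h2,
    Ne.symm h3, Ne.symm h4]
  simp [PySem.Dict.get?]

lemma pvMerge_step (r? : Option Int) (c : Int) (best m : Option (Int × Int)) :
    pvMerge (pvStepB r? best c) m = pvMerge best (pvFront r? c m) := by
  rcases r? with _ | r <;> rcases best with _ | ⟨br, bi⟩ <;> rcases m with _ | ⟨r', j⟩ <;>
    simp only [pvMerge, pvStepB, pvFront] <;> split_ifs <;>
      first
      | rfl
      | (exfalso; omega)
      | (simp only [pvMerge]; split_ifs <;> first | rfl | omega)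

-- B's loop computes the merge of its running best with the suffix minimum
lemma pvGoB_eq (triplets : List (String × String × String)) :
    ∀ (c : Int) (best : Option (Int × Int)),
      pvGoB triplets c best = pvMerge best (pvCasc triplets c) := by
  induction triplets with
  | nil => intro c best; cases best <;> simp [pvGoB, pvCasc, pvMerge]
  | cons x xs ih =>
    intro c best
    rw [pvGoB, ih, pvMerge_step, pvCasc]

-- the suffix minimum equals A's precedence cascade of first-match scans
lemma pvCasc_char (triplets : List (String × String × String)) :
    ∀ (c : Int), pvCasc triplets c =
      match pvInnerA triplets c "^" with
      | some j => some ((0 : Int), j)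
      | none =>
      match pvInnerA triplets c "*" with
      | some j => some ((1 : Int), j)
      | none =>
      match pvInnerA triplets c ":" with
      | some j => some ((2 : Int), j)
      | none =>
      match pvInnerA triplets c "+" with
      | some j => some ((3 : Int), j)
      | none =>
      match pvInnerA triplets c "-" with
      | some j => some ((4 : Int), j)
      | none => none := by
  induction triplets with
  | nil => intro c; simp [pvCasc, pvInnerA]
  | cons x xs ih =>
  intro c
  rw [pvCasc, ih]
  by_cases e0 : x.2.1 = "^"
  ·
    have n1 : x.2.1 ≠ "*" := by rw [e0]; decide
    have n2 : x.2.1 ≠ ":" := by rw [e0]; decide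
    have n3 : x.2.1 ≠ "+" := by rw [e0]; decide
    have n4 : x.2.1 ≠ "-" := by rw [e0]; decide
    have hr : pvRankB.get? "^" = some 0 := by decide
    rcases h0 : pvInnerA xs (c + 1) "^" with _ | j0 <;>
      rcases h1 : pvInnerA xs (c + 1) "*" with _ | j1 <;>
        rcases h2 : pvInnerA xs (c + 1) ":" with _ | j2 <;>
          rcases h3 : pvInnerA xs (c + 1) "+" with _ | j3 <;>
            rcases h4 : pvInnerA xs (c + 1) "-" with _ | j4 <;>
              simp [pvInnerA, pvFront, e0, n1, n2, n3, n4, hr, h0, h1, h2, h3, h4]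
  by_cases e1 : x.2.1 = "*"
  ·
    have n0 : x.2.1 ≠ "^" := by rw [e1]; decide
    have n2 : x.2.1 ≠ ":" := by rw [e1]; decide
    have n3 : x.2.1 ≠ "+" := by rw [e1]; decide
    have n4 : x.2.1 ≠ "-" := by rw [e1]; decide
    have hr : pvRankB.get? "*" = some 1 := by decide
    rcases h0 : pvInnerA xs (c + 1) "^" with _ | j0 <;>
      rcases h1 : pvInnerA xs (c + 1) "*" with _ | j1 <;>
        rcases h2 : pvInnerA xs (c + 1) ":" with _ | j2 <;>
          rcases h3 : pvInnerA xs (c + 1) "+" with _ | j3 <;>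
            rcases h4 : pvInnerA xs (c + 1) "-" with _ | j4 <;>
              simp [pvInnerA, pvFront, e1, n0, n2, n3, n4, hr, h0, h1, h2, h3, h4]
  by_cases e2 : x.2.1 = ":"
  ·
    have n0 : x.2.1 ≠ "^" := by rw [e2]; decide
    have n1 : x.2.1 ≠ "*" := by rw [e2]; decide
    have n3 : x.2.1 ≠ "+" := by rw [e2]; decide
    have n4 : x.2.1 ≠ "-" := by rw [e2]; decide
    have hr : pvRankB.get? ":" = some 2 := by decide
    rcases h0 : pvInnerA xs (c + 1) "^" with _ | j0 <;>
      rcases h1 : pvInnerA xs (c + 1) "*" with _ | j1 <;>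
        rcases h2 : pvInnerA xs (c + 1) ":" with _ | j2 <;>
          rcases h3 : pvInnerA xs (c + 1) "+" with _ | j3 <;>
            rcases h4 : pvInnerA xs (c + 1) "-" with _ | j4 <;>
              simp [pvInnerA, pvFront, e2, n0, n1, n3, n4, hr, h0, h1, h2, h3, h4]
  by_cases e3 : x.2.1 = "+"
  ·
    have n0 : x.2.1 ≠ "^" := by rw [e3]; decide
    have n1 : x.2.1 ≠ "*" := by rw [e3]; decide
    have n2 : x.2.1 ≠ ":" := by rw [e3]; decide
    have n4 : x.2.1 ≠ "-" := by rw [e3]; decide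
    have hr : pvRankB.get? "+" = some 3 := by decide
    rcases h0 : pvInnerA xs (c + 1) "^" with _ | j0 <;>
      rcases h1 : pvInnerA xs (c + 1) "*" with _ | j1 <;>
        rcases h2 : pvInnerA xs (c + 1) ":" with _ | j2 <;>
          rcases h3 : pvInnerA xs (c + 1) "+" with _ | j3 <;>
            rcases h4 : pvInnerA xs (c + 1) "-" with _ | j4 <;>
              simp [pvInnerA, pvFront, e3, n0, n1, n2, n4, hr, h0, h1, h2, h3, h4]
  by_cases e4 : x.2.1 = "-"
  ·
    have n0 : x.2.1 ≠ "^" := by rw [e4]; decide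
    have n1 : x.2.1 ≠ "*" := by rw [e4]; decide
    have n2 : x.2.1 ≠ ":" := by rw [e4]; decide
    have n3 : x.2.1 ≠ "+" := by rw [e4]; decide
    have hr : pvRankB.get? "-" = some 4 := by decide
    rcases h0 : pvInnerA xs (c + 1) "^" with _ | j0 <;>
      rcases h1 : pvInnerA xs (c + 1) "*" with _ | j1 <;>
        rcases h2 : pvInnerA xs (c + 1) ":" with _ | j2 <;>
          rcases h3 : pvInnerA xs (c + 1) "+" with _ | j3 <;>
            rcases h4 : pvInnerA xs (c + 1) "-" with _ | j4 <;>
              simp [pvInnerA, pvFront, e4, n0, n1, n2, n3, hr, h0, h1, h2, h3, h4]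
  have hr : pvRankB.get? x.2.1 = none := pvRank_none _ e0 e1 e2 e3 e4
  rcases h0 : pvInnerA xs (c + 1) "^" with _ | j0 <;>
    rcases h1 : pvInnerA xs (c + 1) "*" with _ | j1 <;>
      rcases h2 : pvInnerA xs (c + 1) ":" with _ | j2 <;>
        rcases h3 : pvInnerA xs (c + 1) "+" with _ | j3 <;>
          rcases h4 : pvInnerA xs (c + 1) "-" with _ | j4 <;>
            simp [pvInnerA, pvFront, e0, e1, e2, e3, e4, hr, h0, h1, h2, h3, h4]

theorem pv_eq_all (triplets : List (String × String × String)) :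
    next_to_evaluate triplets = next_to_evaluate_alt triplets := by
  unfold next_to_evaluate next_to_evaluate_alt
  rw [pvGoB_eq, pvCasc_char]
  rcases h0 : pvInnerA triplets 0 "^" with _ | j0 <;>
    rcases h1 : pvInnerA triplets 0 "*" with _ | j1 <;>
      rcases h2 : pvInnerA triplets 0 ":" with _ | j2 <;>
        rcases h3 : pvInnerA triplets 0 "+" with _ | j3 <;>
          rcases h4 : pvInnerA triplets 0 "-" with _ | j4 <;>
            simp [pvOuterA, pvMerge, h0, h1, h2, h3, h4]

-- ===== VERDICT (by name: the statement is the Claim_ definition above) =====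
theorem next_to_evaluate_spec : Claim_equal_next_to_evaluate := by
  intro triplets _
  unfold Spec_next_to_evaluate
  exact pv_eq_all triplets
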